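-- pv_equiv track=rewrite | github.com/cedadev/cis | cis/aggregation/gridded_collapsor.py | _calc_new_dims
-- ===== SOURCE A (Python) =====
-- def _calc_new_dims(coord_dims, dims_to_collapse):
--     """
--         Calculate the new dimensions for the coordinate.
--     :param coord_dims: the original dimensions
--     :param dims_to_collapse: The dimensions which are being collapsed over
--     :return: The new coordinates which the coord will take on the collapsed cube
--     """
--     new_dims = []
--     # For each original dimension subtract one for every collapsed coordinate which came before it.
--     # TODO: There must be a cleaner way to do this...
--     for d in coord_dims:
--         new_d = d
--         for dc in dims_to_collapse:
--             if d > dc: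
--                 new_d -= 1
--         # If the dimension is one being collapsed then we don't include it in the new dimensions
--         if d not in dims_to_collapse:
--             new_dims.append(new_d)
--
--     return new_dims
-- ===== SOURCE B (Python) =====
-- def _bisect_left(a, x):
--     # leftmost insertion point of x in sorted list a = number of elements < x
--     lo, hi = 0, len(a)
--     while lo < hi:
--         mid = (lo + hi) // 2
--         if a[mid] < x:
--             lo = mid + 1
--         else:
--             hi = mid
--     return lo
--
--
-- def _calc_new_dims(coord_dims, dims_to_collapse):
--     collapsed = sorted(dims_to_collapse)
--     return [d - _bisect_left(collapsed, d)
--             for d in coord_dims if d not in dims_to_collapse]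
-- ===== Notes on version B (the rewrite author's own statement) =====
-- stated objective: alternative
-- what changed: Replaces the nested counting scan (for each dim, re-scan dims_to_collapse decrementing for every smaller collapsed dim) by sorting dims_to_collapse once and computing each offset with a single binary search inside a comprehension.
import Mathlib
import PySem

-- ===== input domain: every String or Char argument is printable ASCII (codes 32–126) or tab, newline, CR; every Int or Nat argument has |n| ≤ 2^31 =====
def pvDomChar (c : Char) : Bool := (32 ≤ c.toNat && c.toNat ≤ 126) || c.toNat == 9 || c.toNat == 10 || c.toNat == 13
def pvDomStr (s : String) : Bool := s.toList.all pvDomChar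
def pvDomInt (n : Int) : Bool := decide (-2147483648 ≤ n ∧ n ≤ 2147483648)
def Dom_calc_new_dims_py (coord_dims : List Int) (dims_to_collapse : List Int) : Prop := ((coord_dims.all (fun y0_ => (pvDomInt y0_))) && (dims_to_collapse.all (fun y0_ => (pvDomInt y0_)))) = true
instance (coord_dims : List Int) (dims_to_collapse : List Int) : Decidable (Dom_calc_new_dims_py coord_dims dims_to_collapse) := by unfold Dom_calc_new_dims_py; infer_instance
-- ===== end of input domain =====

-- B sorts dims_to_collapse once and finds each dim's offset by binary search instead of A's nested counting scan.


-- ===== PORT A =====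
-- for each d: inner loop subtracts 1 for every dc with d > dc; append new_d if d not in dims_to_collapse
def calc_new_dims_py (coord_dims : List Int) (dims_to_collapse : List Int) : List Int :=
  coord_dims.foldl (fun new_dims d =>
    let new_d := dims_to_collapse.foldl (fun nd dc => if d > dc then nd - 1 else nd) d
    if ¬ (dims_to_collapse.contains d) then new_dims ++ [new_d] else new_dims) []

-- ===== PORT B =====
-- hand-written bisect_left of Source B: while lo < hi binary search (a[mid] is always in range; getD is the totality guard)
def blAux (a : List Int) (x : Int) (lo hi : Nat) : Nat :=
  if _h : lo < hi then
    let mid := (lo + hi) / 2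
    if a.getD mid 0 < x then blAux a x (mid + 1) hi else blAux a x lo mid
  else lo
termination_by hi - lo
decreasing_by all_goals omega

def bisect_left_b (a : List Int) (x : Int) : Nat := blAux a x 0 a.length

def calc_new_dims_py_alt (coord_dims : List Int) (dims_to_collapse : List Int) : List Int :=
  let collapsed := PySem.List.sorted dims_to_collapse (fun y => y) false
  coord_dims.filterMap (fun d =>
    if dims_to_collapse.contains d then none
    else some (d - (bisect_left_b collapsed d : Int)))

-- ===== PRECONDITION & SPEC =====
def Spec_calc_new_dims_py (coord_dims : List Int) (dims_to_collapse : List Int) (out : List Int) : Prop := out = calc_new_dims_py_alt coord_dims dims_to_collapse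
instance (coord_dims : List Int) (dims_to_collapse : List Int) (out : List Int) : Decidable (Spec_calc_new_dims_py coord_dims dims_to_collapse out) := by unfold Spec_calc_new_dims_py; infer_instance

-- ===== CLAIM (what is proved, stated in full; the proofs are below) =====
def Claim_equal_calc_new_dims_py : Prop := ∀ (coord_dims : List Int) (dims_to_collapse : List Int), Dom_calc_new_dims_py coord_dims dims_to_collapse → Spec_calc_new_dims_py coord_dims dims_to_collapse (calc_new_dims_py coord_dims dims_to_collapse)

-- ===== LEMMAS AND PROOFS =====

-- on a sorted list, position i holds an element < x iff i is below the count of elements < x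
lemma sorted_getD_lt_iff (a : List Int) (x : Int) (hs : a.Pairwise (· ≤ ·)) :
    ∀ i, i < a.length → (a.getD i 0 < x ↔ i < a.countP (fun y => decide (y < x))) := by
  induction a with
  | nil => intro i hi; simp at hi
  | cons b t ih =>
    intro i hi
    have hb := (List.pairwise_cons.mp hs).1
    have ht := (List.pairwise_cons.mp hs).2
    by_cases hbx : b < x
    · cases i with
      | zero => simp [hbx]
      | succ j =>
        have hj : j < t.length := by simpa using hi
        have hiff := ih ht j hj
        have hd : (decide (b < x)) = true := by simp [hbx]
        rw [List.getD_cons_succ, List.countP_cons, hd, hiff]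
        simp
    · have hct : t.countP (fun y => decide (y < x)) = 0 := by
        apply List.countP_eq_zero.mpr
        intro y hy
        have := hb y hy
        simp; omega
      cases i with
      | zero => simp [hbx, hct]
      | succ j =>
        have hj : j < t.length := by simpa using hi
        have hy : t.getD j 0 ∈ t := by
          rw [List.getD_eq_getElem _ _ hj]; exact List.getElem_mem hj
        have hle := hb _ hy
        have hnot : ¬ t.getD j 0 < x := by omega
        have hd : (decide (b < x)) = false := by simp [hbx]
        rw [List.getD_cons_succ, List.countP_cons, hd, hct]
        constructor
        · intro hh; exact absurd hh hnot
        · intro hh; simp at hh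

-- binary-search invariant: blAux returns the count of elements < x (fuel induction on hi - lo)
lemma blAux_eq_count (a : List Int) (x : Int) (hs : a.Pairwise (· ≤ ·)) :
    ∀ n lo hi, hi - lo ≤ n → lo ≤ a.countP (fun y => decide (y < x)) →
      a.countP (fun y => decide (y < x)) ≤ hi → hi ≤ a.length →
      blAux a x lo hi = a.countP (fun y => decide (y < x)) := by
  intro n
  induction n with
  | zero =>
    intro lo hi hn h1 h2 _
    rw [blAux]
    have h : ¬ lo < hi := by omega
    simp only [dif_neg h]
    omega
  | succ n ih =>
    intro lo hi hn h1 h2 h3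
    by_cases h : lo < hi
    · rw [blAux]
      simp only [dif_pos h]
      have hmid : (lo + hi) / 2 < a.length := by omega
      by_cases hlt : a.getD ((lo + hi) / 2) 0 < x
      · have hc := (sorted_getD_lt_iff a x hs _ hmid).mp hlt
        rw [if_pos hlt]
        exact ih ((lo + hi) / 2 + 1) hi (by omega) (by omega) h2 h3
      · have hc : ¬ (lo + hi) / 2 < a.countP (fun y => decide (y < x)) := by
          intro hcc; exact hlt ((sorted_getD_lt_iff a x hs _ hmid).mpr hcc)
        rw [if_neg hlt]
        exact ih lo ((lo + hi) / 2) (by omega) h1 (by omega) (by omega)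
    · rw [blAux]
      simp only [dif_neg h]
      omega

lemma bisect_left_sorted_eq_count (l : List Int) (x : Int) :
    bisect_left_b (PySem.List.sorted l (fun y => y) false) x
      = l.countP (fun y => decide (y < x)) := by
  set s := PySem.List.sorted l (fun y => y) false with hsdef
  have hperm : s.Perm l := PySem.List.sorted_perm l (fun y => y) false
  have hpair : s.Pairwise (· ≤ ·) := by
    simpa using PySem.List.sorted_pairwise l (fun y => y)
  have hc : s.countP (fun y => decide (y < x)) = l.countP (fun y => decide (y < x)) :=
    hperm.countP_eq _
  have hlen : s.countP (fun y => decide (y < x)) ≤ s.length := List.countP_le_length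
  rw [bisect_left_b, blAux_eq_count s x hpair s.length 0 s.length (by omega) (by omega) hlen (le_refl _), hc]

-- A's inner loop computes d minus the count of smaller collapsed dims
lemma inner_fold_eq (l : List Int) (d : Int) :
    ∀ acc : Int, l.foldl (fun nd dc => if d > dc then nd - 1 else nd) acc
      = acc - l.countP (fun dc => decide (dc < d)) := by
  induction l with
  | nil => intro acc; simp
  | cons b t ih =>
    intro acc
    simp only [List.foldl_cons, List.countP_cons, ih]
    by_cases h : b < d
    · simp only [gt_iff_lt, h]
      simp
      omega
    · simp only [gt_iff_lt, h]
      simp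

-- A's append-accumulator fold is a filterMap
lemma outer_fold_eq (dtc : List Int) (g : Int → Int) :
    ∀ (cd : List Int) (acc : List Int),
      cd.foldl (fun new_dims d =>
        if ¬ (dtc.contains d) then new_dims ++ [g d] else new_dims) acc
      = acc ++ cd.filterMap (fun d => if dtc.contains d then none else some (g d)) := by
  intro cd
  induction cd with
  | nil => intro acc; simp
  | cons d t ih =>
    intro acc
    by_cases h : dtc.contains d
    · simp only [List.foldl_cons, List.filterMap_cons, h, if_pos, not_true, ite_false]
      simpa using ih acc
    · have hb : dtc.contains d = false := by simpa using h
      simp only [List.foldl_cons, List.filterMap_cons, hb, not_false_iff, ite_true,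
        Bool.false_eq_true, if_false]
      rw [ih (acc ++ [g d])]
      simp

-- ===== VERDICT (by name: the statement is the Claim_ definition above) =====
theorem calc_new_dims_py_spec : Claim_equal_calc_new_dims_py := by
  intro cd dtc _
  show calc_new_dims_py cd dtc = calc_new_dims_py_alt cd dtc
  unfold calc_new_dims_py calc_new_dims_py_alt
  rw [outer_fold_eq dtc (fun d => dtc.foldl (fun nd dc => if d > dc then nd - 1 else nd) d) cd []]
  rw [List.nil_append]
  apply List.filterMap_congr
  intro d _
  by_cases h : dtc.contains d
  · rw [if_pos h, if_pos h]
  · have hm : d ∉ dtc := by simpa using h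
    rw [if_neg (by simpa using hm), if_neg (by simpa using hm)]
    rw [inner_fold_eq, bisect_left_sorted_eq_count]
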